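-- pv_equiv track=rewrite | github.com/hargovindsinghit/The-Complete-FAANG-Preparation | 1]. DSA + CP/2]. Competitive Programming/21] BCTCI/BCTCI/Python/Chapter 27 - Two Pointers/SmallerPrefixes.py | smaller_prefixes
-- ===== SOURCE A (Python) =====
-- from typing import List
--
-- def smaller_prefixes(arr: List[int]) -> bool:
--     """
--     Determines if the sum of the first k elements is smaller than the sum of the next 2k elements
--     for every k in the range 1 ≤ k ≤ n/2, where n is the length of the array.
--
--     Args:
--         arr (List[int]): A list of integers with even length.
--
--     Returns:
--         bool:
--             - True if the condition holds for all valid k.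
--             - False if any prefix sum is not smaller than the sum of the next two elements.
--
--     Approach:
--         - A two-pointer technique is used to optimize the solution from O(n^2) to O(n).
--         - A slow pointer (`sp`) tracks the prefix sum, while a fast pointer (`fp`) evaluates
--           the sum of the next two consecutive elements.
--
--     Time Complexity:
--         O(n), where n is the length of the array, due to single-pass traversal.
--
--     Space Complexity:
--         O(1), as only a few additional variables are used.
--     """
--     sp, fp = 0, 0  # Initialize slow and fast pointers
--     slow_sum, fast_sum = 0, 0  # Initialize prefix sums
--
--     # Traverse the array until the fast pointer reaches the second last element
--     while fp < len(arr) - 1: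
--         slow_sum += arr[sp]
--         fast_sum += arr[fp] + arr[fp + 1]
--
--         if slow_sum >= fast_sum:
--             return False  # Condition failed for some k
--
--         sp += 1  # Move slow pointer by 1
--         fp += 2  # Move fast pointer by 2
--
--     return True  # Condition holds for all k
-- ===== SOURCE B (Python) =====
-- from typing import List
--
-- def smaller_prefixes(arr: List[int]) -> bool:
--     # Prefix-sum table: P[i] = sum(arr[:i]); then a single indexed check pass.
--     P = [0]
--     s = 0
--     for x in arr:
--         s += x
--         P.append(s)
--     n = len(arr)
--     return all(P[k] < P[2 * k] for k in range(1, n // 2 + 1))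
-- ===== Notes on version B (the rewrite author's own statement) =====
-- stated objective: alternative
-- what changed: Replaces the two-pointer incremental running sums with a precomputed prefix-sum table P followed by one pass over k = 1..n//2 checking P[k] < P[2k].
import Mathlib
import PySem

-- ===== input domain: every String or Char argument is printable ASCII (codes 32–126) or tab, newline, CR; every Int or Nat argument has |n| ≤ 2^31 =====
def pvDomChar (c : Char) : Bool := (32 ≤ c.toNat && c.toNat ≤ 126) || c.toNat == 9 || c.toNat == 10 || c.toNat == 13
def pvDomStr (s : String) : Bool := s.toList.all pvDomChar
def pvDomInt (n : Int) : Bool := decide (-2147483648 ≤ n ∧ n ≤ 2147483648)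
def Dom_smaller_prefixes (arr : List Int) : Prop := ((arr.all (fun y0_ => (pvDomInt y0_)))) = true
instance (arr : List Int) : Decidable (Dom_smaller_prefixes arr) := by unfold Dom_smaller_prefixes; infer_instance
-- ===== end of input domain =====

-- B replaces A's incremental two-pointer running sums by a prefix-sum table and one indexed
-- check pass over k = 1..n//2 (alternative decomposition, same cost).

-- ===== PORT A =====
-- while loop of A; indices sp, fp, fp+1 are always in range when reached from the entry
-- (sp = k ≤ n/2 - 1, fp + 1 = 2k + 1 ≤ n - 1), so List.getD here is exactly Python's arr[i].
def spLoop (arr : List Int) (sp fp : Nat) (slow fast : Int) : Bool :=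
  if h : fp < arr.length - 1 then
    let slow' := slow + arr.getD sp 0
    let fast' := fast + (arr.getD fp 0 + arr.getD (fp + 1) 0)
    if slow' ≥ fast' then false
    else spLoop arr (sp + 1) (fp + 2) slow' fast'
  else true
termination_by arr.length - fp
decreasing_by omega

def smaller_prefixes (arr : List Int) : Bool := spLoop arr 0 0 0 0

-- ===== PORT B =====
-- P = [0]; s = 0; for x in arr: s += x; P.append(s)  — accumulator state (P, s)
def buildP (arr : List Int) : List Int :=
  (arr.foldl (fun st x => (st.1 ++ [st.2 + x], st.2 + x)) (([0] : List Int), (0 : Int))).1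

-- all(P[k] < P[2*k] for k in range(1, n//2 + 1)); indices k, 2k ≤ n are always in range,
-- so List.getD is exactly Python's P[i].
def smaller_prefixes_alt (arr : List Int) : Bool :=
  let P := buildP arr
  (List.range' 1 (arr.length / 2)).all (fun k => decide (P.getD k 0 < P.getD (2 * k) 0))

-- ===== PRECONDITION & SPEC =====
def Spec_smaller_prefixes (arr : List Int) (out : Bool) : Prop := out = smaller_prefixes_alt arr
instance (arr : List Int) (out : Bool) : Decidable (Spec_smaller_prefixes arr out) := by unfold Spec_smaller_prefixes; infer_instance

-- ===== CLAIM (what is proved, stated in full; the proofs are below) =====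
def Claim_equal_smaller_prefixes : Prop := ∀ (arr : List Int), Dom_smaller_prefixes arr → Spec_smaller_prefixes arr (smaller_prefixes arr)

-- ===== LEMMAS AND PROOFS =====

/-- Sum of the first `m` elements. -/
def pvS (arr : List Int) (m : Nat) : Int := (arr.take m).sum

lemma pvS_succ (arr : List Int) (m : Nat) (h : m < arr.length) :
    pvS arr (m + 1) = pvS arr m + arr.getD m 0 := by
  unfold pvS
  rw [List.take_add_one, List.getElem?_eq_getElem h, List.sum_append,
    List.getD_eq_getElem?_getD, List.getElem?_eq_getElem h]
  simp

lemma buildP_inv (l : List Int) (p : List Int) (s : Int) :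
    l.foldl (fun st x => (st.1 ++ [st.2 + x], st.2 + x)) (p, s)
      = (p ++ (List.range l.length).map (fun i => s + pvS l (i + 1)), s + l.sum) := by
  induction l generalizing p s with
  | nil => simp
  | cons x t ih =>
      simp only [List.foldl_cons, ih, List.length_cons, List.range_succ_eq_map,
        List.map_cons, List.map_map, Prod.mk.injEq]
      refine ⟨?_, by simp; ring⟩
      rw [List.append_assoc, List.singleton_append]
      simp [pvS]
      intro a _
      ring

lemma buildP_getD (arr : List Int) (j : Nat) (h : j ≤ arr.length) :
    (buildP arr).getD j 0 = pvS arr j := by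
  unfold buildP
  rw [buildP_inv]
  rcases Nat.eq_zero_or_pos j with hj | hj
  · subst hj; simp [pvS]
  · obtain ⟨i, rfl⟩ : ∃ i, j = i + 1 := ⟨j - 1, by omega⟩
    have hi : i < arr.length := by omega
    simp [List.getD_eq_getElem?_getD, hi]

lemma spLoop_eq (arr : List Int) (k : Nat) :
    spLoop arr k (2 * k) (pvS arr k) (pvS arr (2 * k))
      = (List.range' (k + 1) (arr.length / 2 - k)).all
          (fun j => decide (pvS arr j < pvS arr (2 * j))) := by
  have hm : ∃ m, m = arr.length / 2 - k := ⟨_, rfl⟩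
  obtain ⟨m, hmk⟩ := hm
  induction m generalizing k with
  | zero =>
      rw [spLoop]
      have hg : ¬ (2 * k < arr.length - 1) := by omega
      simp [hg, ← hmk]
  | succ m ih =>
      have hk2 : k + 1 ≤ arr.length / 2 := by omega
      have hg : 2 * k < arr.length - 1 := by omega
      have hkn : k < arr.length := by omega
      have h2k : 2 * k < arr.length := by omega
      have h2k1 : 2 * k + 1 < arr.length := by omega
      rw [spLoop]
      simp only [hg, dif_pos]
      have hslow : pvS arr k + arr.getD k 0 = pvS arr (k + 1) := (pvS_succ arr k hkn).symm
      have hfast : pvS arr (2 * k) + (arr.getD (2 * k) 0 + arr.getD (2 * k + 1) 0)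
          = pvS arr (2 * (k + 1)) := by
        have e1 := pvS_succ arr (2 * k) h2k
        have e2 := pvS_succ arr (2 * k + 1) h2k1
        have : 2 * (k + 1) = (2 * k + 1) + 1 := by omega
        rw [this, e2, e1]; ring
      rw [hslow, hfast]
      have hr : List.range' (k + 1) (m + 1)
          = (k + 1) :: List.range' (k + 2) m := by rw [List.range'_succ]
      rw [show arr.length / 2 - k = m + 1 from hmk.symm, hr]
      by_cases hc : pvS arr (k + 1) ≥ pvS arr (2 * (k + 1))
      · simp only [if_pos hc, List.all_cons]
        have : ¬ (pvS arr (k + 1) < pvS arr (2 * (k + 1))) := by omega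
        simp [this]
      · simp only [if_neg hc, List.all_cons]
        have hlt : pvS arr (k + 1) < pvS arr (2 * (k + 1)) := by omega
        have := ih (k + 1) (by omega)
        rw [show arr.length / 2 - (k+1) = m by omega] at this
        rw [show 2 * k + 2 = 2 * (k + 1) by ring, this]
        simp [hlt]

lemma all_congr_mem {α : Type} (l : List α) (f g : α → Bool)
    (h : ∀ x ∈ l, f x = g x) : l.all f = l.all g := by
  induction l with
  | nil => rfl
  | cons x t ih =>
      simp only [List.all_cons, h x (by simp), ih (fun y hy => h y (by simp [hy]))]

-- ===== VERDICT (by name: the statement is the Claim_ definition above) =====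
theorem smaller_prefixes_spec : Claim_equal_smaller_prefixes := by
  intro arr _
  unfold Spec_smaller_prefixes smaller_prefixes smaller_prefixes_alt
  have h0 : pvS arr 0 = 0 := rfl
  have := spLoop_eq arr 0
  simp only [Nat.mul_zero, h0, Nat.sub_zero, Nat.zero_add] at this
  rw [this]
  apply all_congr_mem
  intro j hj
  have hjmem : 1 ≤ j ∧ j < 1 + arr.length / 2 := by simpa using hj
  rw [buildP_getD arr j (by omega), buildP_getD arr (2 * j) (by omega)]
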